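-- pv_equiv track=rewrite | github.com/wingz7162/pyCommandLine | commandLine.py | findExtension
-- ===== SOURCE A (Python) =====
-- def findExtension(filename):
--     atPeriod = False
--     i = 0
--     while i < len(filename):
--         if filename[i] == ".":
--             atPeriod = True
--         if atPeriod:
--             if filename[i] == " ":
--                 break
--         i += 1
--     return i
-- ===== SOURCE B (Python) =====
-- def findExtension(filename):
--     # Collect every index of a space that has a period somewhere before it,
--     # and take the smallest such index; default to the full length.
--     return min((i for i, c in enumerate(filename)
--                 if c == ' ' and '.' in filename[:i]),
--                default=len(filename))
-- ===== Notes on version B (the rewrite author's own statement) =====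
-- stated objective: alternative
-- what changed: Replaces A's stateful flag-driven scan (boolean atPeriod carried through a while loop) with a stateless filtered minimum: enumerate all space positions whose prefix contains a period and take the smallest, defaulting to the length.
import Mathlib
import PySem

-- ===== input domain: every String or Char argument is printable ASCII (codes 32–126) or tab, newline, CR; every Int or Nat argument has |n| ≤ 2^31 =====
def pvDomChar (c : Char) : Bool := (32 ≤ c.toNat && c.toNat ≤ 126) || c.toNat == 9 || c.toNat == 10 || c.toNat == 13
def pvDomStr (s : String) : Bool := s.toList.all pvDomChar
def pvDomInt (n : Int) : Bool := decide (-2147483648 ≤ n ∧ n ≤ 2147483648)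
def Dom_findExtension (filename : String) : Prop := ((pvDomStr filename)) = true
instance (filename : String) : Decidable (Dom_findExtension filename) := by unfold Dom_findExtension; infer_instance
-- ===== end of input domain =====

-- B replaces A's stateful flag-driven scan with a stateless filtered minimum
-- (smallest space index whose prefix contains a period, defaulting to the length); objective: alternative decomposition, same result.
-- ===== PORT A =====
-- A: flag-driven scan — walk the characters, set a flag at the first '.', stop at a space once flagged.
def findExtensionLoop : List Char → Bool → Int → Int
  | [], _, i => i
  | c :: rest, atPeriod, i =>
    let atPeriod := if c = '.' then true else atPeriod
    if atPeriod = true ∧ c = ' ' then i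
    else findExtensionLoop rest atPeriod (i + 1)

def findExtension (filename : String) : Int :=
  findExtensionLoop filename.toList false 0

-- ===== PORT B =====
-- B: the generator expression "i for i, c in enumerate(filename) if c == ' ' and '.' in filename[:i]" …
def pvCands (cs : List Char) : List Int :=
  (PySem.List.enumerate cs).filterMap
      (fun ic => if ic.2 = ' ' ∧ PySem.Chars.isIn ['.'] (PySem.List.slice cs none (some ic.1)) = true
                 then some ic.1 else none)

-- … fed to min(…, default=len(filename)).
def findExtension_alt (filename : String) : Int :=
  (PySem.List.min? (pvCands filename.toList) (fun x => x)).getD ((filename.toList.length : Int))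

-- ===== PRECONDITION & SPEC =====
def Spec_findExtension (filename : String) (out : Int) : Prop := out = findExtension_alt filename
instance (filename : String) (out : Int) : Decidable (Spec_findExtension filename out) := by unfold Spec_findExtension; infer_instance

-- ===== CLAIM (what is proved, stated in full; the proofs are below) =====
def Claim_equal_findExtension : Prop := ∀ (filename : String), Dom_findExtension filename → Spec_findExtension filename (findExtension filename)

-- ===== LEMMAS AND PROOFS =====

-- the common characterisation: index of the first ' ' at or after the first '.', else the length
def pvSpecN (cs : List Char) : Int :=
  match cs.findIdx? (· == '.') with
  | none => (cs.length : Int)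
  | some p => (p : Int) + (((cs.drop p).findIdx? (· == ' ')).elim ((cs.drop p).length : Int) (fun q => (q : Int)))

-- ['.'] is an infix of a list iff '.' is an element of it
theorem pv_singleton_infix (c : Char) (l : List Char) : [c] <:+: l ↔ c ∈ l := by
  constructor
  · intro h; exact h.sublist.subset (by simp)
  · intro h
    obtain ⟨s, t, rfl⟩ := List.append_of_mem h
    exact ⟨s, t, by simp⟩

-- the flag-set phase: once atPeriod is true, A returns i + (index of first space, else remaining length)
theorem pv_loopT (cs : List Char) (i : Int) :
    findExtensionLoop cs true i =
      i + ((cs.findIdx? (· == ' ')).elim ((cs.length : Int)) (fun q => (q : Int))) := by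
  induction cs generalizing i with
  | nil => simp [findExtensionLoop]
  | cons c t ih =>
    by_cases hc : c = ' '
    · subst hc
      simp [findExtensionLoop, List.findIdx?_cons]
    · rw [show findExtensionLoop (c :: t) true i = findExtensionLoop t true (i + 1) by
        simp [findExtensionLoop, hc], ih]
      cases ht : t.findIdx? (· == ' ') with
      | none => simp [List.findIdx?_cons, hc, ht, Option.elim]; ring
      | some q => simp [List.findIdx?_cons, hc, ht, Option.elim]; push_cast [Int.add_comm]; ring

-- the searching phase: A equals i plus the characterisation
theorem pv_loopF (cs : List Char) (i : Int) :
    findExtensionLoop cs false i = i + pvSpecN cs := by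
  induction cs generalizing i with
  | nil => simp [findExtensionLoop, pvSpecN]
  | cons c t ih =>
    by_cases hc : c = '.'
    · subst hc
      rw [show findExtensionLoop ('.' :: t) false i = findExtensionLoop t true (i + 1) by
        simp [findExtensionLoop], pv_loopT]
      cases ht : t.findIdx? (· == ' ') with
      | none =>
        simp [pvSpecN, List.findIdx?_cons, ht, Option.elim]
        ring
      | some q =>
        simp [pvSpecN, List.findIdx?_cons, ht, Option.elim]
        ring
    · rw [show findExtensionLoop (c :: t) false i = findExtensionLoop t false (i + 1) by
        simp [findExtensionLoop, hc], ih]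
      cases ht : t.findIdx? (· == '.') with
      | none =>
        simp [pvSpecN, List.findIdx?_cons, hc, ht]
        ring
      | some p =>
        simp [pvSpecN, List.findIdx?_cons, hc, ht, Option.elim]
        ring

-- membership in B's candidate list, in plain terms
theorem pv_mem_cands (cs : List Char) (x : Int) :
    x ∈ pvCands cs ↔ ∃ (k : Nat) (h : k < cs.length), x = (k : Int) ∧ cs[k] = ' ' ∧ '.' ∈ cs.take k := by
  unfold pvCands
  simp only [List.mem_filterMap, PySem.List.mem_enumerate_iff]
  constructor
  · rintro ⟨ic, ⟨k, hk, rfl⟩, hif⟩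
    simp only [zero_add] at hif
    split_ifs at hif with hcond
    · obtain ⟨hsp, hin⟩ := hcond
      obtain rfl : ((k : Int)) = x := Option.some.inj hif
      rw [PySem.List.slice_to_natCast, PySem.Chars.isIn_iff_infix, pv_singleton_infix] at hin
      exact ⟨k, hk, rfl, hsp, hin⟩
  · rintro ⟨k, hk, rfl, hsp, hin⟩
    refine ⟨((k : Int), cs[k]), ⟨k, hk, by simp⟩, ?_⟩
    have hin'' : PySem.Chars.isIn ['.'] (List.take k cs) = true :=
      (PySem.Chars.isIn_iff_infix _ _).mpr ((pv_singleton_infix _ _).mpr hin)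
    have hin' : PySem.Chars.isIn ['.'] (PySem.List.slice cs none (some ((k : Nat) : Int))) = true := by
      rw [PySem.List.slice_to_natCast]; exact hin''
    simp [hsp, hin'']

-- the minimum of the candidate list, with the length as default, is the characterisation
theorem pv_min_cands (cs : List Char) :
    (PySem.List.min? (pvCands cs) (fun x => x)).getD ((cs.length : Int)) = pvSpecN cs := by
  cases hp : cs.findIdx? (· == '.') with
  | none =>
    have hnodot : '.' ∉ cs := by
      intro hmem
      have := List.findIdx?_eq_none_iff.mp hp '.' hmem
      simp at this
    have hnil : pvCands cs = [] := by
      rw [List.eq_nil_iff_forall_not_mem]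
      intro x hx
      obtain ⟨k, hk, _, _, hin⟩ := (pv_mem_cands cs x).mp hx
      exact hnodot (List.mem_of_mem_take hin)
    have hnone : PySem.List.min? ([] : List Int) (fun x => x) = none :=
      (PySem.List.min?_eq_none_iff _ _).mpr rfl
    rw [hnil, hnone]
    simp [pvSpecN, hp]
  | some p =>
    obtain ⟨hp_lt, hp_dot, hp_min⟩ := List.findIdx?_eq_some_iff_getElem.mp hp
    simp only [beq_iff_eq] at hp_dot
    -- any candidate index k lies strictly after the first period
    have hcand_gt : ∀ (k : Nat) (hk : k < cs.length), cs[k] = ' ' → '.' ∈ cs.take k → p < k := by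
      intro k hk hsp hin
      obtain ⟨j, hj, hjval⟩ := List.mem_iff_getElem.mp hin
      have hjk : j < k := by
        have := hj; simp [List.length_take] at this; omega
      rw [List.getElem_take] at hjval
      by_contra hle
      push_neg at hle
      have := hp_min j (by omega)
      simp [hjval] at this
    cases hq : (cs.drop p).findIdx? (· == ' ') with
    | none =>
      have hnosp : ∀ (k : Nat) (hk : k < cs.length), p ≤ k → cs[k] ≠ ' ' := by
        intro k hk hpk hsp
        have hk' : k - p < (cs.drop p).length := by simp [List.length_drop]; omega
        have hv? : (cs.drop p)[k - p]? = some ' ' := by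
          rw [List.getElem?_drop, show p + (k - p) = k by omega, List.getElem?_eq_getElem hk, hsp]
        have hv : (cs.drop p)[k - p]'hk' = ' ' := by
          have := List.getElem?_eq_getElem hk'
          rw [hv?] at this; exact (Option.some.inj this).symm
        have := List.findIdx?_eq_none_iff.mp hq _ (List.getElem_mem hk')
        simp [hv] at this
      have hnil : pvCands cs = [] := by
        rw [List.eq_nil_iff_forall_not_mem]
        intro x hx
        obtain ⟨k, hk, _, hsp, hin⟩ := (pv_mem_cands cs x).mp hx
        exact hnosp k hk (Nat.le_of_lt (hcand_gt k hk hsp hin)) hsp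
      have hnone : PySem.List.min? ([] : List Int) (fun x => x) = none :=
        (PySem.List.min?_eq_none_iff _ _).mpr rfl
      rw [hnil, hnone]
      simp [pvSpecN, hp, hq, Option.elim]
      omega
    | some q =>
      obtain ⟨hq_lt, hq_sp0, hq_min⟩ := List.findIdx?_eq_some_iff_getElem.mp hq
      simp only [beq_iff_eq] at hq_sp0
      have hm_lt : p + q < cs.length := by
        have := hq_lt; simp [List.length_drop] at this; omega
      have hq_sp? : cs[p + q]? = some ' ' := by
        rw [← List.getElem?_drop, List.getElem?_eq_getElem hq_lt, hq_sp0]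
      have hq_sp : cs[p + q]'hm_lt = ' ' := by
        have := List.getElem?_eq_getElem hm_lt
        rw [hq_sp?] at this; exact (Option.some.inj this).symm
      have hq_pos : 0 < q := by
        rcases Nat.eq_zero_or_pos q with h0 | h
        · exfalso
          have hdot? : cs[p]? = some '.' := by rw [List.getElem?_eq_getElem hp_lt, hp_dot]
          have h2 := hq_sp?
          rw [h0, Nat.add_zero, hdot?] at h2
          simp at h2
        · exact h
      -- p + q is a candidate …
      have hmem : ((p : Int) + (q : Int)) ∈ pvCands cs := by
        rw [pv_mem_cands]
        refine ⟨p + q, hm_lt, by push_cast; ring, hq_sp, ?_⟩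
        rw [List.mem_iff_getElem]
        refine ⟨p, ?_, ?_⟩
        · simp [List.length_take]; omega
        · rw [List.getElem_take]; exact hp_dot
      -- … and the least one
      have hmin : ∀ x ∈ pvCands cs, ((p : Int) + (q : Int)) ≤ x := by
        intro x hx
        obtain ⟨k, hk, rfl, hsp, hin⟩ := (pv_mem_cands cs x).mp hx
        have hpk : p < k := hcand_gt k hk hsp hin
        have hq_le : q ≤ k - p := by
          by_contra hlt
          push_neg at hlt
          have hkp_lt : k - p < (cs.drop p).length := by simp [List.length_drop]; omega
          have hv? : (cs.drop p)[k - p]? = some ' ' := by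
            rw [List.getElem?_drop, show p + (k - p) = k by omega, List.getElem?_eq_getElem hk, hsp]
          have hv : (cs.drop p)[k - p]'hkp_lt = ' ' := by
            have := List.getElem?_eq_getElem hkp_lt
            rw [hv?] at this; exact (Option.some.inj this).symm
          have := hq_min (k - p) hlt
          simp [hv] at this
        omega
      have hne : pvCands cs ≠ [] := List.ne_nil_of_mem hmem
      obtain ⟨m, hm⟩ : ∃ m, PySem.List.min? (pvCands cs) (fun x => x) = some m := by
        cases h : PySem.List.min? (pvCands cs) (fun x => x) with
        | none => exact absurd ((PySem.List.min?_eq_none_iff _ _).mp h) hne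
        | some m => exact ⟨m, rfl⟩
      have h1 : m ≤ (p : Int) + (q : Int) := PySem.List.min?_isMin hm _ hmem
      have h2 : (p : Int) + (q : Int) ≤ m := hmin m (PySem.List.min?_mem hm)
      rw [hm, Option.getD_some, le_antisymm h1 h2]
      simp [pvSpecN, hp, hq, Option.elim]

-- ===== VERDICT (by name: the statement is the Claim_ definition above) =====
theorem findExtension_spec : Claim_equal_findExtension := by
  intro filename _
  unfold Spec_findExtension findExtension_alt
  rw [pv_min_cands]
  unfold findExtension
  rw [pv_loopF]
  ring
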